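-- pv_equiv track=rewrite | github.com/derick01/undergrad-thesis | analyzenba.py | teamkey2datekey
-- ===== SOURCE A (Python) =====
-- def teamkey2datekey(teamsch):
--     ''' convert teams as keys to game dates as keys'''
--
--     schedseason = {}
--
--     for t in teamsch:
--         for game in teamsch[t]:
--             if game[0] not in schedseason.keys():
--                 schedseason[game[0]] = []
--
--             if game[1] not in schedseason[game[0]]:
--                 schedseason[game[0]].append(game[1])
--
--     return schedseason
-- ===== SOURCE B (Python) =====
-- def teamkey2datekey(teamsch):
--     ''' convert teams as keys to game dates as keys'''
--     # Pass 1: collect every opponent/date value per game date, duplicates and all.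
--     collected = {}
--     for games in teamsch.values():
--         for game in games:
--             collected[game[0]] = collected.get(game[0], []) + [game[1]]
--     # Pass 2: dedupe each list, preserving first-seen order.
--     return {k: list(dict.fromkeys(v)) for k, v in collected.items()}
-- ===== Notes on version B (the rewrite author's own statement) =====
-- stated objective: alternative
-- what changed: B separates the work into two passes - an unconditional collect pass with no membership tests over the accumulating dict, then a dedup pass via dict.fromkeys on each value list - instead of A's inline key-existence and membership checks on every game.
import Mathlib
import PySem

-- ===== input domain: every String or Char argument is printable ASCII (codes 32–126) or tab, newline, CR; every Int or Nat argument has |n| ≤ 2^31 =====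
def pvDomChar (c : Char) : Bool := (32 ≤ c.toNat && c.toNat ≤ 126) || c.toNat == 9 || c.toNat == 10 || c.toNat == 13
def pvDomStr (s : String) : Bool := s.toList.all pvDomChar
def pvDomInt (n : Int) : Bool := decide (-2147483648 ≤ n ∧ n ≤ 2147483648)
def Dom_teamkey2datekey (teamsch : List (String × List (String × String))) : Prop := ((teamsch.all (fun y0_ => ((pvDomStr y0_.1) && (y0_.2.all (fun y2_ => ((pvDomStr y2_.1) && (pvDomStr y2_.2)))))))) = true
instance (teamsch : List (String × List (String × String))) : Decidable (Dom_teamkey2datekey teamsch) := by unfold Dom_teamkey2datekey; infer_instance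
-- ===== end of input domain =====

-- teamkey2datekey: B collects all dates per key unconditionally in one pass and dedups each
-- value list in a second pass (dict.fromkeys), instead of A's inline membership checks (alternative).
-- Pre_ only excludes association lists with duplicate keys, which do not represent a Python dict.


-- ===== PORT A =====
-- one inner-loop body of A: the key-existence check, then the membership check before append
def stepA (d : PySem.Dict String (List String)) (g : String × String) : PySem.Dict String (List String) :=
  let d1 := if d.contains g.1 = false then d.insert g.1 [] else d
  if g.2 ∈ d1.getD g.1 [] then d1 else d1.modify g.1 [] (fun v => v ++ [g.2])

-- 'for t in teamsch: for game in teamsch[t]: …' — iterate the keys, look each one up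
def teamkey2datekey (teamsch : List (String × List (String × String))) : List (String × List String) :=
  ((teamsch.map (fun p => p.1)).foldl
    (fun d t => ((PySem.Dict.mk teamsch).getD t []).foldl stepA d)
    PySem.Dict.empty).items

-- ===== PORT B =====
-- one inner-loop body of B: collected[game[0]] = collected.get(game[0], []) + [game[1]]
def stepB (d : PySem.Dict String (List String)) (g : String × String) : PySem.Dict String (List String) :=
  d.modify g.1 [] (fun v => v ++ [g.2])

-- pass 1 over teamsch.values(), pass 2: list(dict.fromkeys(v)) = distinct elements, first-seen order
def teamkey2datekey_alt (teamsch : List (String × List (String × String))) : List (String × List String) :=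
  let collected := teamsch.foldl (fun d t => t.2.foldl stepB d) PySem.Dict.empty
  collected.items.map (fun p => (p.1, (PySem.Set.ofList p.2 : List String)))

-- ===== PRECONDITION & SPEC =====
-- Pre_ excludes association lists with duplicate keys: teamsch is a Python dict, whose keys are
-- unique, so a duplicate-key list does not represent any input A actually receives.
def Pre_teamkey2datekey (teamsch : List (String × List (String × String))) : Prop :=
  (teamsch.map (fun p => p.1)).Nodup
instance (teamsch : List (String × List (String × String))) : Decidable (Pre_teamkey2datekey teamsch) := by unfold Pre_teamkey2datekey; infer_instance
def pvWitness_teamkey2datekey : (List (String × List (String × String))) :=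
  [("GSW", [("2016-01-01", "LAL"), ("2016-01-02", "BOS")]), ("LAL", [("2016-01-01", "GSW")])]

def Spec_teamkey2datekey (teamsch : List (String × List (String × String))) (out : List (String × List String)) : Prop := out = teamkey2datekey_alt teamsch
instance (teamsch : List (String × List (String × String))) (out : List (String × List String)) : Decidable (Spec_teamkey2datekey teamsch out) := by unfold Spec_teamkey2datekey; infer_instance

-- ===== CLAIM (what is proved, stated in full; the proofs are below) =====
def Claim_equal_teamkey2datekey : Prop := ∀ (teamsch : List (String × List (String × String))), Dom_teamkey2datekey teamsch → Pre_teamkey2datekey teamsch → Spec_teamkey2datekey teamsch (teamkey2datekey teamsch)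

-- ===== LEMMAS AND PROOFS =====

-- dedup absorbs an appended element that is already present, else appends it
theorem ofList_append_singleton (v : List String) (x : String) :
    (PySem.Set.ofList (v ++ [x]) : List String)
      = if x ∈ (PySem.Set.ofList v : List String) then (PySem.Set.ofList v : List String)
        else (PySem.Set.ofList v : List String) ++ [x] := by
  rw [PySem.Set.ofList_append, PySem.Set.update_cons, PySem.Set.update_nil, PySem.Set.add]
  simp

-- the invariant carried through the game loop: equal keys, nodup keys, A's value = dedup of B's value
def DRel (dA dB : PySem.Dict String (List String)) : Prop :=
  dA.keys = dB.keys ∧ dB.keys.Nodup ∧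
    ∀ c, dA.getD c [] = (PySem.Set.ofList (dB.getD c []) : List String)

theorem rel_step (dA dB : PySem.Dict String (List String)) (g : String × String)
    (h : DRel dA dB) : DRel (stepA dA g) (stepB dB g) := by
  obtain ⟨hk, hnd, hv⟩ := h
  have hc : dA.contains g.1 = dB.contains g.1 := by
    by_cases hm : g.1 ∈ dB.keys
    · rw [(PySem.Dict.contains_iff_mem_keys dA g.1).mpr (hk ▸ hm),
        (PySem.Dict.contains_iff_mem_keys dB g.1).mpr hm]
    · have h1 : dA.contains g.1 ≠ true := fun hh =>
        hm (hk ▸ (PySem.Dict.contains_iff_mem_keys dA g.1).mp hh)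
      have h2 : dB.contains g.1 ≠ true := fun hh =>
        hm ((PySem.Dict.contains_iff_mem_keys dB g.1).mp hh)
      simp at h1 h2; rw [h1, h2]
  -- d1's value at g.1 is dA's value at g.1 in both branches
  by_cases hct : dA.contains g.1 = true
  · -- key already present: stepA's first if is skipped
    have hB : stepB dB g = dB.modify g.1 [] (fun v => v ++ [g.2]) := rfl
    constructor
    · -- keys
      show (stepA dA g).keys = (stepB dB g).keys
      rw [hB, PySem.Dict.keys_modify,
        PySem.Dict.keys_insert_of_contains dB _ (hc ▸ hct)]
      unfold stepA
      simp only [hct, Bool.true_eq_false, if_false]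
      split
      · exact hk
      · rw [PySem.Dict.keys_modify, PySem.Dict.keys_insert_of_contains dA _ hct]; exact hk
    refine ⟨?_, ?_⟩
    · rw [hB, PySem.Dict.keys_modify]
      rw [PySem.Dict.keys_insert_of_contains dB _ (hc ▸ hct)]; exact hnd
    · intro c
      have hBv : (stepB dB g).getD c [] =
          if c = g.1 then dB.getD g.1 [] ++ [g.2] else dB.getD c [] := by
        rw [hB, PySem.Dict.getD_modify]
      unfold stepA
      simp only [hct, Bool.true_eq_false, if_false]
      by_cases hcg : c = g.1
      · subst hcg
        rw [hBv, if_pos rfl, ofList_append_singleton, ← hv g.1]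
        split
        · rfl
        · rw [PySem.Dict.getD_modify]; simp
      · rw [hBv, if_neg hcg]
        split
        · exact hv c
        · rw [PySem.Dict.getD_modify_of_ne dA _ _ hcg]; exact hv c
  · -- fresh key
    have hcf : dA.contains g.1 = false := by simpa using hct
    have hcfB : dB.contains g.1 = false := hc ▸ hcf
    have hd1 : stepA dA g = (dA.insert g.1 []).modify g.1 [] (fun v => v ++ [g.2]) := by
      unfold stepA
      rw [if_pos hcf, if_neg]
      simp
    have hB : stepB dB g = dB.modify g.1 [] (fun v => v ++ [g.2]) := rfl
    have hknew : (stepA dA g).keys = dA.keys ++ [g.1] := by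
      rw [hd1, PySem.Dict.keys_modify, PySem.Dict.keys_insert_of_contains,
        PySem.Dict.keys_insert_of_not_contains dA _ hcf]
      simp
    have hkB : (stepB dB g).keys = dB.keys ++ [g.1] := by
      rw [hB, PySem.Dict.keys_modify, PySem.Dict.keys_insert_of_not_contains dB _ hcfB]
    refine ⟨by rw [hknew, hkB, hk], ?_, ?_⟩
    · rw [hkB]
      have hni : g.1 ∉ dB.keys := fun hm =>
        by simp [(PySem.Dict.contains_iff_mem_keys dB g.1).mpr hm] at hcfB
      refine List.Nodup.append hnd (List.nodup_singleton _) ?_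
      intro a ha hb
      simp only [List.mem_singleton] at hb
      exact hni (hb ▸ ha)
    · intro c
      rw [hd1, hB, PySem.Dict.getD_modify, PySem.Dict.getD_modify]
      by_cases hcg : c = g.1
      · subst hcg
        rw [if_pos rfl, PySem.Dict.getD_insert, if_pos rfl]
        rw [PySem.Dict.getD_of_not_contains dB _ hcfB]
        simp [PySem.Set.ofList, PySem.Set.add, PySem.Set.empty]
      · simp only [if_neg hcg]
        rw [PySem.Dict.getD_insert]
        simp only [if_neg hcg]
        exact hv c

theorem rel_foldl (games : List (String × String)) (dA dB : PySem.Dict String (List String))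
    (h : DRel dA dB) : DRel (games.foldl stepA dA) (games.foldl stepB dB) := by
  induction games generalizing dA dB with
  | nil => exact h
  | cons g gs ih => exact ih _ _ (rel_step dA dB g h)

theorem rel_empty : DRel PySem.Dict.empty PySem.Dict.empty := by
  refine ⟨rfl, ?_, fun c => ?_⟩ <;>
    simp [PySem.Dict.empty, PySem.Dict.keys, PySem.Dict.getD, PySem.Dict.get?,
      PySem.Set.ofList, PySem.Set.empty]

-- both nested loops are the fold of their step over the flattened game list
theorem foldl_flatMap_eq (step : PySem.Dict String (List String) → (String × String) → PySem.Dict String (List String))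
    (ts : List (String × List (String × String))) (d : PySem.Dict String (List String)) :
    ts.foldl (fun d t => t.2.foldl step d) d = (ts.flatMap (fun t => t.2)).foldl step d := by
  induction ts generalizing d with
  | nil => rfl
  | cons t ts ih => simp [List.flatMap_cons, List.foldl_append, ih]

-- under nodup keys, looking each key of teamsch up yields that entry's own game list
theorem loopA_eq (teamsch : List (String × List (String × String)))
    (hnd : (teamsch.map (fun p => p.1)).Nodup) :
    (teamsch.map (fun p => p.1)).foldl
        (fun d t => ((PySem.Dict.mk teamsch).getD t []).foldl stepA d) PySem.Dict.empty
      = teamsch.foldl (fun d t => t.2.foldl stepA d) PySem.Dict.empty := by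
  rw [List.foldl_map]
  refine PySem.List.foldl_congr_mem _ _ _ _ (fun acc x hx => ?_)
  have hget : (PySem.Dict.mk teamsch).getD x.1 [] = x.2 :=
    PySem.Dict.getD_of_mem_items (PySem.Dict.mk teamsch) (k := x.1) (v := x.2)
      (by exact hx) (by simpa [PySem.Dict.keys_mk] using hnd) []
  rw [hget]

-- ===== VERDICT (by name: the statement is the Claim_ definition above) =====
theorem teamkey2datekey_spec : Claim_equal_teamkey2datekey := by
  intro teamsch _ hpre
  unfold Spec_teamkey2datekey teamkey2datekey
  simp only [teamkey2datekey_alt]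
  rw [loopA_eq teamsch hpre, foldl_flatMap_eq stepA, foldl_flatMap_eq stepB]
  obtain ⟨hk, hnd, hv⟩ := rel_foldl (teamsch.flatMap (fun t => t.2)) _ _ rel_empty
  set DA := (teamsch.flatMap (fun t => t.2)).foldl stepA PySem.Dict.empty
  set DB := (teamsch.flatMap (fun t => t.2)).foldl stepB PySem.Dict.empty
  rw [PySem.Dict.items_eq_map_keys DA (hk ▸ hnd) [],
    PySem.Dict.items_eq_map_keys DB hnd []]
  simp only [List.map_map, hk]
  exact List.map_congr_left (fun k _ => by simp [Function.comp, hv k])
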